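-- pv_equiv track=rewrite | github.com/kingxiaofire/MyMLTemplates | Code/02Proprecessdata.py | attack_classify
-- ===== SOURCE A (Python) =====
-- def attack_classify(tag):
--     dic_attack_type ={
--          'BENIGN':['BENIGN']
--         ,'DOS':['DoS Hulk','DoS GoldenEye','DoS slowloris','DoS Slowhttptest','DDoS','Heartbleed']
--         ,'PortScan':['PortScan']
--         ,'Brute Force':['FTP-Patator','SSH-Patator']
--         ,'Web Attack':['Web_Attack_Brute_Force','Web_Attack_XSS','Web_Attack_Sql_Injection']
--         ,'Bot':['Bot']
--         ,'Infiltration':['Infiltration']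
--     }
--     for i in dic_attack_type.keys():
--         if tag in dic_attack_type[i]:
--             return i
--     else:
--         return tag
-- ===== SOURCE B (Python) =====
-- # Binary search over a sorted flat (tag, category) table instead of scanning
-- # per-category lists: same mapping, different algorithm/data structure.
-- _KEYS = ['BENIGN', 'Bot', 'DDoS', 'DoS GoldenEye', 'DoS Hulk',
--          'DoS Slowhttptest', 'DoS slowloris', 'FTP-Patator', 'Heartbleed',
--          'Infiltration', 'PortScan', 'SSH-Patator', 'Web_Attack_Brute_Force',
--          'Web_Attack_Sql_Injection', 'Web_Attack_XSS']
-- _CATS = ['BENIGN', 'Bot', 'DOS', 'DOS', 'DOS',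
--          'DOS', 'DOS', 'Brute Force', 'DOS',
--          'Infiltration', 'PortScan', 'Brute Force', 'Web Attack',
--          'Web Attack', 'Web Attack']
--
-- def attack_classify(tag):
--     lo, hi = 0, len(_KEYS)
--     while lo < hi:
--         mid = (lo + hi) // 2
--         k = _KEYS[mid]
--         if k == tag:
--             return _CATS[mid]
--         if k < tag:
--             lo = mid + 1
--         else:
--             hi = mid
--     return tag
-- ===== Notes on version B (the rewrite author's own statement) =====
-- stated objective: alternative
-- what changed: Replaced the per-call category->list dict with its linear membership scans by a sorted flat (tag, category) table probed with a hand-written binary search, falling through to the tag itself when the search window empties.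
import Mathlib
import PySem

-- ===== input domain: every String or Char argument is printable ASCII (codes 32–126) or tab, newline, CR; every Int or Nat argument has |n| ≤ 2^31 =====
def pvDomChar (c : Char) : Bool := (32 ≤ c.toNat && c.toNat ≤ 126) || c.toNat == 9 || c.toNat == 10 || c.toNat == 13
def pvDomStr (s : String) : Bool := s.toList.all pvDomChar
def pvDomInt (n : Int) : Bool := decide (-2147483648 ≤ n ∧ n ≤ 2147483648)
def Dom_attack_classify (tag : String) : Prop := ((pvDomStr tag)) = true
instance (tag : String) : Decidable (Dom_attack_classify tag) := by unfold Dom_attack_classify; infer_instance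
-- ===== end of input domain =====

-- B replaces A's per-call category->list dict and linear membership scan by a binary search
-- over a sorted flat (tag, category) table (alternative algorithm/data structure).


-- ===== PORT A =====
-- A's dict literal, in insertion order
def acDict : List (String × List String) :=
  [ ("BENIGN", ["BENIGN"])
  , ("DOS", ["DoS Hulk", "DoS GoldenEye", "DoS slowloris", "DoS Slowhttptest", "DDoS", "Heartbleed"])
  , ("PortScan", ["PortScan"])
  , ("Brute Force", ["FTP-Patator", "SSH-Patator"])
  , ("Web Attack", ["Web_Attack_Brute_Force", "Web_Attack_XSS", "Web_Attack_Sql_Injection"])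
  , ("Bot", ["Bot"])
  , ("Infiltration", ["Infiltration"]) ]

-- the for-loop over the dict's keys: first key whose list contains tag, else tag
def acLoop (tag : String) : List (String × List String) → String
  | [] => tag
  | (k, tags) :: rest => if tags.contains tag then k else acLoop tag rest

def attack_classify (tag : String) : String := acLoop tag acDict

-- ===== PORT B =====
-- B's sorted key table and the parallel category table
def acKeys : List String :=
  [ "BENIGN", "Bot", "DDoS", "DoS GoldenEye", "DoS Hulk"
  , "DoS Slowhttptest", "DoS slowloris", "FTP-Patator", "Heartbleed"
  , "Infiltration", "PortScan", "SSH-Patator", "Web_Attack_Brute_Force"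
  , "Web_Attack_Sql_Injection", "Web_Attack_XSS" ]

def acCats : List String :=
  [ "BENIGN", "Bot", "DOS", "DOS", "DOS"
  , "DOS", "DOS", "Brute Force", "DOS"
  , "Infiltration", "PortScan", "Brute Force", "Web Attack"
  , "Web Attack", "Web Attack" ]

-- Python's string `<` (lexicographic by code point), ported by hand; exact for all
-- strings of Unicode scalar values, in particular on the ASCII domain here
def acChLt : List Char -> List Char -> Bool
  | _, [] => false
  | [], _ :: _ => true
  | a :: as, b :: bs => a.toNat < b.toNat || (a.toNat == b.toNat && acChLt as bs)

def acStrLt (a b : String) : Bool := acChLt a.toList b.toList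

-- B's while-loop, as structural recursion on a fuel counter (= len(_KEYS), enough
-- iterations since hi-lo shrinks each step; fuel is only a totality guard)
def acGo (tag : String) : Nat → Nat → Nat → String
  | 0, _, _ => tag
  | fuel+1, lo, hi =>
    if lo < hi then
      let mid := (lo + hi) / 2
      let k := acKeys.getD mid ""
      if k == tag then acCats.getD mid tag
      else if acStrLt k tag then acGo tag fuel (mid+1) hi
      else acGo tag fuel lo mid
    else tag

def attack_classify_alt (tag : String) : String := acGo tag acKeys.length 0 acKeys.length

-- ===== PRECONDITION & SPEC =====
def Spec_attack_classify (tag : String) (out : String) : Prop := out = attack_classify_alt tag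
instance (tag : String) (out : String) : Decidable (Spec_attack_classify tag out) := by unfold Spec_attack_classify; infer_instance

-- ===== CLAIM =====
def Claim_equal_attack_classify : Prop := ∀ (tag : String), Dom_attack_classify tag → Spec_attack_classify tag (attack_classify tag)

-- ===== LEMMAS AND PROOFS =====

-- if tag is not one of the 15 keys, the binary search comes up empty and returns tag
theorem acGo_not_mem (tag : String) (h : tag ∉ acKeys) :
    ∀ fuel lo hi, acGo tag fuel lo hi = tag := by
  intro fuel
  induction fuel with
  | zero => intro lo hi; rfl
  | succ n ih =>
    intro lo hi
    simp only [acGo]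
    split
    · by_cases hm : (lo + hi) / 2 < acKeys.length
      · have hk : acKeys.getD ((lo + hi) / 2) "" ∈ acKeys := by
          rw [List.getD_eq_getElem _ _ hm]; exact List.getElem_mem hm
        have he : ¬ (acKeys.getD ((lo + hi) / 2) "" == tag) = true := by
          simp only [beq_iff_eq]; intro he; exact h (he ▸ hk)
        rw [if_neg he]
        split <;> exact ih _ _
      · have hk : acKeys.getD ((lo + hi) / 2) "" = "" :=
          List.getD_eq_default _ _ (Nat.le_of_not_lt hm)
        rw [hk]
        by_cases he : ("" == tag) = true
        · rw [if_pos he]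
          have hc : acCats.length ≤ (lo + hi) / 2 := by
            have : acKeys.length = acCats.length := by decide
            omega
          exact List.getD_eq_default _ _ hc
        · rw [if_neg he]
          split <;> exact ih _ _
    · rfl

-- ===== VERDICT =====
theorem attack_classify_spec : Claim_equal_attack_classify := by
  intro tag _
  unfold Spec_attack_classify attack_classify attack_classify_alt
  by_cases h0 : tag = "BENIGN"
  · subst h0; decide
  by_cases h1 : tag = "DoS Hulk"
  · subst h1; decide
  by_cases h2 : tag = "DoS GoldenEye"
  · subst h2; decide
  by_cases h3 : tag = "DoS slowloris"
  · subst h3; decide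
  by_cases h4 : tag = "DoS Slowhttptest"
  · subst h4; decide
  by_cases h5 : tag = "DDoS"
  · subst h5; decide
  by_cases h6 : tag = "Heartbleed"
  · subst h6; decide
  by_cases h7 : tag = "PortScan"
  · subst h7; decide
  by_cases h8 : tag = "FTP-Patator"
  · subst h8; decide
  by_cases h9 : tag = "SSH-Patator"
  · subst h9; decide
  by_cases h10 : tag = "Web_Attack_Brute_Force"
  · subst h10; decide
  by_cases h11 : tag = "Web_Attack_XSS"
  · subst h11; decide
  by_cases h12 : tag = "Web_Attack_Sql_Injection"
  · subst h12; decide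
  by_cases h13 : tag = "Bot"
  · subst h13; decide
  by_cases h14 : tag = "Infiltration"
  · subst h14; decide
  have hnm : tag ∉ acKeys := by
    simp [acKeys, h0, h1, h2, h3, h4, h5, h6, h7, h8, h9, h10, h11, h12, h13, h14]
  rw [acGo_not_mem tag hnm]
  simp [acLoop, acDict, h0, h1, h2, h3, h4, h5, h6, h7, h8, h9, h10, h11, h12, h13, h14]
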